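-- pv_equiv track=rewrite | github.com/ejfn/advent-of-code | 2022/1/day1.py | parse_calorie_groups
-- ===== SOURCE A (Python) =====
-- def parse_calorie_groups(raw: str) -> list[int]:
--     groups = []
--     current = 0
--     for line in raw.splitlines():
--         line = line.strip()
--         if not line:
--             groups.append(current)
--             current = 0
--         else:
--             current += int(line)
--     groups.append(current)
--     return groups
-- ===== SOURCE B (Python) =====
-- def parse_calorie_groups(raw: str) -> list[int]:
--     lines = [l.strip() for l in raw.splitlines()]
--     groups = [0]
--     for line in reversed(lines):
--         if not line:
--             groups.insert(0, 0)
--         else: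
--             groups[0] = groups[0] + int(line)
--     return groups
-- ===== Notes on version B (the rewrite author's own statement) =====
-- stated objective: alternative
-- what changed: B pre-strips all lines, then builds the group list back-to-front in a single reversed traversal, prepending a fresh 0 group at each blank line instead of A's forward accumulator-and-flush loop.
import Mathlib
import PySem

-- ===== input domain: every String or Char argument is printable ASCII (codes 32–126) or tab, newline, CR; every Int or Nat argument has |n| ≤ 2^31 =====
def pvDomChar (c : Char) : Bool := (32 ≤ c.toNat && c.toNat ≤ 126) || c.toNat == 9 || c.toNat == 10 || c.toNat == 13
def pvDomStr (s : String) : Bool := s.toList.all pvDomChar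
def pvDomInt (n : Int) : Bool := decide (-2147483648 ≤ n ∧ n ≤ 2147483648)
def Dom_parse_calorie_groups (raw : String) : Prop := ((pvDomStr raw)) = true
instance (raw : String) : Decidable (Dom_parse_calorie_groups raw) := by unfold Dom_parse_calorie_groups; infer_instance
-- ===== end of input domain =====

-- B builds the same group list back-to-front in one reversed pass (alternative decomposition, same cost).

-- ===== PORT A =====
def parse_calorie_groups (raw : String) : List Int :=
  let r := (PySem.Str.splitlines raw).foldl (fun (s : List Int × Int) (line : String) =>
    let line := PySem.Str.strip line
    if line = "" then (s.1 ++ [s.2], 0)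
    else (s.1, s.2 + (PySem.Int.ofStr? line).getD 0)) ([], 0)
  r.1 ++ [r.2]

-- ===== PORT B =====
def parse_calorie_groups_alt (raw : String) : List Int :=
  let lines := (PySem.Str.splitlines raw).map PySem.Str.strip
  lines.foldr (fun line groups =>
    if line = "" then 0 :: groups
    else match groups with
      | g :: t => (g + (PySem.Int.ofStr? line).getD 0) :: t
      | [] => []) [0]

-- ===== PRECONDITION & SPEC =====
-- Pre_ excludes exactly the inputs where Python's int(line) raises ValueError on a non-blank line.
def Pre_parse_calorie_groups (raw : String) : Prop :=
  ∀ line ∈ PySem.Str.splitlines raw,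
    PySem.Str.strip line ≠ "" → (PySem.Int.ofStr? (PySem.Str.strip line)).isSome = true
instance (raw : String) : Decidable (Pre_parse_calorie_groups raw) := by
  unfold Pre_parse_calorie_groups; infer_instance
def pvWitness_parse_calorie_groups : String := "1\n2\n\n 3 "
def Spec_parse_calorie_groups (raw : String) (out : List Int) : Prop := out = parse_calorie_groups_alt raw
instance (raw : String) (out : List Int) : Decidable (Spec_parse_calorie_groups raw out) := by unfold Spec_parse_calorie_groups; infer_instance

-- ===== CLAIM (what is proved, stated in full; the proofs are below) =====
def Claim_equal_parse_calorie_groups : Prop := ∀ (raw : String), Dom_parse_calorie_groups raw → Pre_parse_calorie_groups raw → Spec_parse_calorie_groups raw (parse_calorie_groups raw)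

-- ===== LEMMAS AND PROOFS =====

-- A's loop step, on an already-stripped line
def pvStepA (s : List Int × Int) (line : String) : List Int × Int :=
  if line = "" then (s.1 ++ [s.2], 0)
  else (s.1, s.2 + (PySem.Int.ofStr? line).getD 0)

-- B's foldr step
def pvStepB (line : String) (groups : List Int) : List Int :=
  if line = "" then 0 :: groups
  else match groups with
    | g :: t => (g + (PySem.Int.ofStr? line).getD 0) :: t
    | [] => []

def pvBump (c : Int) : List Int → List Int
  | [] => []
  | h :: t => (c + h) :: t

theorem pvFoldrB_nonempty (ls : List String) : ∃ h t, ls.foldr pvStepB [0] = h :: t := by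
  induction ls with
  | nil => exact ⟨0, [], rfl⟩
  | cons l ls ih =>
    obtain ⟨h, t, ih⟩ := ih
    by_cases hl : l = "" <;> simp [pvStepB, hl, ih]

theorem pvFold_eq (ls : List String) : ∀ (g : List Int) (c : Int),
    (ls.foldl pvStepA (g, c)).1 ++ [(ls.foldl pvStepA (g, c)).2]
      = g ++ pvBump c (ls.foldr pvStepB [0]) := by
  induction ls with
  | nil => intro g c; simp [pvBump]
  | cons l ls ih =>
    intro g c
    obtain ⟨h, t, hf⟩ := pvFoldrB_nonempty ls
    by_cases hl : l = ""
    · simp only [List.foldl_cons, List.foldr_cons, pvStepA, pvStepB, hl]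
      rw [ih, hf]
      simp [pvBump]
    · simp only [List.foldl_cons, List.foldr_cons, pvStepA, pvStepB, hl]
      rw [ih, hf]
      simp [pvBump]
      ring

-- ===== VERDICT (by name: the statement is the Claim_ definition above) =====
theorem parse_calorie_groups_spec : Claim_equal_parse_calorie_groups := by
  intro raw _ _
  unfold Spec_parse_calorie_groups parse_calorie_groups parse_calorie_groups_alt
  have h1 : ∀ (init : List Int × Int) (xs : List String),
      xs.foldl (fun (s : List Int × Int) (line : String) =>
        let line := PySem.Str.strip line
        if line = "" then (s.1 ++ [s.2], 0)
        else (s.1, s.2 + (PySem.Int.ofStr? line).getD 0)) init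
      = (xs.map PySem.Str.strip).foldl pvStepA init := by
    intro init xs
    rw [List.foldl_map]
    rfl
  have h2 : ∀ (xs : List String), xs.foldr (fun line groups =>
        if line = "" then 0 :: groups
        else match groups with
          | g :: t => (g + (PySem.Int.ofStr? line).getD 0) :: t
          | [] => []) [0] = xs.foldr pvStepB [0] := fun _ => rfl
  simp only [h1, h2]
  have := pvFold_eq ((PySem.Str.splitlines raw).map PySem.Str.strip) [] 0
  rw [this]
  obtain ⟨h, t, hf⟩ := pvFoldrB_nonempty ((PySem.Str.splitlines raw).map PySem.Str.strip)
  simp [hf, pvBump]
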